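-- pv_equiv track=rewrite | github.com/jaden-miguel/pcpartFinder | pcfinder/telegram_util.py | split_apprise_urls
-- ===== SOURCE A (Python) =====
-- def parse_tgram_url(url: str) -> tuple[str, str] | None:
--     u = url.strip()
--     if not u.startswith("tgram://"):
--         return None
--     rest = u[8:]
--     if "/" not in rest:
--         return None
--     token, chat = rest.split("/", 1)
--     if not token or not chat:
--         return None
--     return token, chat
--
-- def split_apprise_urls(urls: list[str]) -> tuple[tuple[str, str] | None, list[str]]:
--     tgram: tuple[str, str] | None = None
--     other: list[str] = []
--     for u in urls:
--         parsed = parse_tgram_url(u)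
--         if parsed:
--             if tgram is None:
--                 tgram = parsed
--             else:
--                 other.append(u)
--         else:
--             other.append(u)
--     return tgram, other
-- ===== SOURCE B (Python) =====
-- def parse_tgram_url(url: str) -> tuple[str, str] | None:
--     u = url.strip()
--     if not u.startswith("tgram://"):
--         return None
--     rest = u[8:]
--     if "/" not in rest:
--         return None
--     token, chat = rest.split("/", 1)
--     if not token or not chat:
--         return None
--     return token, chat
--
-- def split_apprise_urls(urls: list[str]) -> tuple[tuple[str, str] | None, list[str]]:
--     idx = next((i for i, u in enumerate(urls) if parse_tgram_url(u) is not None), None)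
--     if idx is None:
--         return None, list(urls)
--     return parse_tgram_url(urls[idx]), urls[:idx] + urls[idx + 1:]
-- ===== Notes on version B (the rewrite author's own statement) =====
-- stated objective: alternative
-- what changed: Instead of one scan maintaining a tgram-is-None flag and appending to an accumulator, B first locates the index of the first URL that parses as tgram and builds the remainder by slicing around that index (or copies the list if none parses).
import Mathlib
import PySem

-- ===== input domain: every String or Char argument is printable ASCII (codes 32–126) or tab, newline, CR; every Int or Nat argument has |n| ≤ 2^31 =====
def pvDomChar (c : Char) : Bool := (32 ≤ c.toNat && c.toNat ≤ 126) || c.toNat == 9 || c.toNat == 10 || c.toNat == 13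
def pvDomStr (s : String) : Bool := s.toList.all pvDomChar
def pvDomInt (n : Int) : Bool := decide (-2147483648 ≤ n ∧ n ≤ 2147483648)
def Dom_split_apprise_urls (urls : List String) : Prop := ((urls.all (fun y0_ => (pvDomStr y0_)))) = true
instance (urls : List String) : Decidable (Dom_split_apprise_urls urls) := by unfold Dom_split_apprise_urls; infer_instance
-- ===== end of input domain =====

-- B replaces A's one-pass scan with a tgram-is-None flag by: find the index of the
-- first URL parsing as tgram, then build 'other' by slicing around it (alternative decomposition).

-- ===== PORT A =====
-- shared module helper, transliterated once (B's Python carries the identical helper)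
def parse_tgram_url (url : String) : Option (String × String) :=
  let u := PySem.Str.strip url
  if PySem.Str.startswith u "tgram://" = false then none
  else
    let rest := PySem.Str.slice u (some 8) none
    if PySem.Str.isIn "/" rest = false then none
    else
      match PySem.Str.splitMax? rest "/" 1 with
      | some [token, chat] => if token = "" || chat = "" then none else some (token, chat)
      | _ => none

-- the for-loop over (tgram, other), as structural recursion on the list
def pvLoopA : List String → Option (String × String) → List String → (Option (String × String)) × List String
  | [], tgram, other => (tgram, other)
  | u :: rest, tgram, other =>
    match parse_tgram_url u with
    | some parsed =>
      match tgram with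
      | none => pvLoopA rest (some parsed) other
      | some _ => pvLoopA rest tgram (other ++ [u])
    | none => pvLoopA rest tgram (other ++ [u])

def split_apprise_urls (urls : List String) : (Option (String × String)) × List String :=
  pvLoopA urls none []

-- ===== PORT B =====
def split_apprise_urls_alt (urls : List String) : (Option (String × String)) × List String :=
  match (PySem.List.enumerate urls 0).find? (fun p => (parse_tgram_url p.2).isSome) with
  | none => (none, urls)
  | some (i, u) =>
    (parse_tgram_url u,
     PySem.List.slice urls none (some i) ++ PySem.List.slice urls (some (i + 1)) none)

-- ===== PRECONDITION & SPEC =====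
def Spec_split_apprise_urls (urls : List String) (out : (Option (String × String)) × List String) : Prop := out = split_apprise_urls_alt urls
instance (urls : List String) (out : (Option (String × String)) × List String) : Decidable (Spec_split_apprise_urls urls out) := by unfold Spec_split_apprise_urls; infer_instance

-- ===== CLAIM (what is proved, stated in full; the proofs are below) =====
def Claim_equal_split_apprise_urls : Prop := ∀ (urls : List String), Dom_split_apprise_urls urls → Spec_split_apprise_urls urls (split_apprise_urls urls)

-- ===== LEMMAS AND PROOFS =====

-- once tgram is set, every remaining url goes to other
theorem pvLoopA_some (l : List String) (t : String × String) :
    ∀ other, pvLoopA l (some t) other = (some t, other ++ l) := by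
  induction l with
  | nil => intro other; simp [pvLoopA]
  | cons u rest ih =>
    intro other
    cases h : parse_tgram_url u <;> simp [pvLoopA, h, ih]

-- shifting the enumerate start only shifts the index of the found pair
theorem pvFind_enumerate_shift (l : List String) :
    ∀ s : Int, (PySem.List.enumerate l s).find? (fun p => (parse_tgram_url p.2).isSome)
      = ((PySem.List.enumerate l 0).find? (fun p => (parse_tgram_url p.2).isSome)).map
          (fun p => (p.1 + s, p.2)) := by
  induction l with
  | nil => intro s; simp [PySem.List.enumerate_nil]
  | cons u rest ih =>
    intro s
    rw [PySem.List.enumerate_cons, PySem.List.enumerate_cons]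
    by_cases h : (parse_tgram_url u).isSome
    · rw [List.find?_cons_of_pos (by simpa using h), List.find?_cons_of_pos (by simpa using h)]
      simp
    · rw [List.find?_cons_of_neg (by simpa using h), List.find?_cons_of_neg (by simpa using h)]
      rw [ih (s + 1), ih (0 + 1)]
      cases hf : (PySem.List.enumerate rest 0).find? (fun p => (parse_tgram_url p.2).isSome) <;>
        simp
      omega

-- the found pair is a genuine (index, element) of the list
theorem pvFind_enumerate_mem (l : List String) (i : Int) (u : String)
    (h : (PySem.List.enumerate l 0).find? (fun p => (parse_tgram_url p.2).isSome) = some (i, u)) :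
    ∃ k : Nat, k < l.length ∧ i = (k : Int) ∧ l[k]? = some u := by
  have hm : (i, u) ∈ PySem.List.enumerate l 0 := List.mem_of_find?_eq_some h
  rw [PySem.List.mem_enumerate_iff] at hm
  obtain ⟨k, hk, hp⟩ := hm
  refine ⟨k, hk, ?_, ?_⟩
  · have := congrArg Prod.fst hp; simpa using this
  · have := congrArg Prod.snd hp; simp at this
    simp [List.getElem?_eq_getElem hk, this]

theorem pvLoopA_none (l : List String) :
    ∀ other, pvLoopA l none other
      = ((split_apprise_urls_alt l).1, other ++ (split_apprise_urls_alt l).2) := by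
  induction l with
  | nil => intro other; simp [pvLoopA, split_apprise_urls_alt, PySem.List.enumerate_nil]
  | cons u rest ih =>
    intro other
    cases h : parse_tgram_url u with
    | some p =>
      rw [show pvLoopA (u :: rest) none other = pvLoopA rest (some p) other by simp [pvLoopA, h],
        pvLoopA_some]
      have hfind : (PySem.List.enumerate (u :: rest) 0).find?
          (fun p => (parse_tgram_url p.2).isSome) = some (0, u) := by
        rw [PySem.List.enumerate_cons]
        exact List.find?_cons_of_pos (by simp [h])
      unfold split_apprise_urls_alt
      rw [hfind]
      simp [h, PySem.List.slice_to _ (by omega : (0:Int) ≤ 0), PySem.List.slice_from_one]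
    | none =>
      rw [show pvLoopA (u :: rest) none other = pvLoopA rest none (other ++ [u]) by
        simp [pvLoopA, h], ih]
      have hcons : (PySem.List.enumerate (u :: rest) 0).find?
          (fun p => (parse_tgram_url p.2).isSome)
          = ((PySem.List.enumerate rest 0).find? (fun p => (parse_tgram_url p.2).isSome)).map
              (fun p => (p.1 + 1, p.2)) := by
        rw [PySem.List.enumerate_cons, List.find?_cons_of_neg (by simp [h]),
          pvFind_enumerate_shift rest (0 + 1)]
        simp
      cases hf : (PySem.List.enumerate rest 0).find? (fun p => (parse_tgram_url p.2).isSome) with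
      | none =>
        unfold split_apprise_urls_alt
        rw [hcons, hf]
        simp
      | some iu =>
        obtain ⟨i, v⟩ := iu
        obtain ⟨k, hk, hik, hgv⟩ := pvFind_enumerate_mem rest i v hf
        subst hik
        unfold split_apprise_urls_alt
        rw [hcons, hf]
        simp only [Option.map_some]
        rw [PySem.List.slice_to _ (by positivity : (0:Int) ≤ (k:Int)),
          PySem.List.slice_from _ (by positivity : (0:Int) ≤ (k:Int) + 1),
          PySem.List.slice_to _ (by positivity : (0:Int) ≤ (k:Int) + 1),
          PySem.List.slice_from _ (by positivity : (0:Int) ≤ (k:Int) + 1 + 1)]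
        have e1 : ((k:Int) + 1).toNat = k + 1 := by omega
        have e2 : ((k:Int) + 1 + 1).toNat = k + 2 := by omega
        rw [e1, e2]
        simp [List.take_succ_cons, List.drop_succ_cons, Int.toNat_natCast]

-- ===== VERDICT (by name: the statement is the Claim_ definition above) =====
theorem split_apprise_urls_spec : Claim_equal_split_apprise_urls := by
  intro urls _
  unfold Spec_split_apprise_urls split_apprise_urls
  rw [pvLoopA_none]
  simp
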